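-- pv_equiv track=rewrite | github.com/sarishtshreshth0/plag_extract | Project_CodeNet_Python800/p03104/s985011476.py | count
-- ===== SOURCE A (Python) =====
-- def count(N):
--     cnt = []
--     r = 1
--     while r < N:
--         res = (N // (2 * r)) * r + max(N % (2 * r) - r, 0)
--         cnt.append(res)
--         r *= 2
--     return cnt
-- ===== SOURCE B (Python) =====
-- def count(N):
--     # Divide and conquer: the bit-k count over [0, N) is obtained from the
--     # bit-(k-1) count over [0, N//2): every y < N//2 occurs twice as a half of
--     # an x < N, plus (if N is odd) one extra occurrence of y = N//2 itself.
--     if N <= 1: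
--         return []
--     m, b = divmod(N, 2)
--     prev = count(m)
--     res = [m]
--     s = 1
--     while 2 * s < N:
--         c = prev[0] if prev else 0
--         prev = prev[1:]
--         res.append(2 * c + b * ((m // s) % 2))
--         s *= 2
--     return res
-- ===== Notes on version B (the rewrite author's own statement) =====
-- stated objective: alternative
-- what changed: A computes each bit-position count with an independent per-position closed-form formula; B is a divide-and-conquer recursion on N//2 that lifts the bit counts of [0, N//2) one position up, with an odd-N correction term.
import Mathlib
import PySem

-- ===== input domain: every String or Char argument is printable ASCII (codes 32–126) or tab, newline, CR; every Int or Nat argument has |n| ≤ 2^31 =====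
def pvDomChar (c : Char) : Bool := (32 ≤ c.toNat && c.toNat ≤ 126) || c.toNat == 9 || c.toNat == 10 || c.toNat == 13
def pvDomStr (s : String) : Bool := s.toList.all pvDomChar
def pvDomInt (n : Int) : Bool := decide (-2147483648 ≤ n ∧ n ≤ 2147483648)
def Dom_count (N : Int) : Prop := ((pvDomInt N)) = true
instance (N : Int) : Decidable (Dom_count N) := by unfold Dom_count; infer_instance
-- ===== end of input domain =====

-- B replaces A's independent per-position closed-form formula by a divide-and-conquer
-- recursion on N//2 that lifts the bit counts of [0, N//2) one position up;
-- objective: alternative (a genuinely different algorithm, same result).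

-- ===== PORT A =====
-- A's while loop; the '0 < r' conjunct in the guard only serves termination: the loop is
-- entered with r = 1 and r only doubles, so 0 < r holds on every reachable state.
def countGo (N r : Int) : List Int :=
  if h : 0 < r ∧ r < N then
    (PySem.Int.floordiv N (2 * r) * r + max (PySem.Int.mod N (2 * r) - r) 0) :: countGo N (2 * r)
  else []
termination_by (N - r).toNat
decreasing_by omega

def count (N : Int) : List Int := countGo N 1

-- ===== PORT B =====
-- Source B's while loop ('0 < s' in the guard again only serves termination: s starts at 1
-- and doubles); 'prev[0] if prev else 0' is headD 0, 'prev[1:]' is tail (exact on lists).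
def loopGo (N m b : Int) (prev : List Int) (s : Int) : List Int :=
  if h : 0 < s ∧ 2 * s < N then
    (2 * prev.headD 0 + b * PySem.Int.mod (PySem.Int.floordiv m s) 2)
      :: loopGo N m b prev.tail (2 * s)
  else []
termination_by (N - s).toNat
decreasing_by omega

def count_alt (N : Int) : List Int :=
  if h : N ≤ 1 then []
  else
    PySem.Int.floordiv N 2
      :: loopGo N (PySem.Int.floordiv N 2) (PySem.Int.mod N 2)
           (count_alt (PySem.Int.floordiv N 2)) 1
termination_by N.toNat
decreasing_by
  rw [PySem.Int.floordiv_eq_ediv_of_pos (by omega : (0:Int) < 2)]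
  omega

-- ===== PRECONDITION & SPEC =====
def Spec_count (N : Int) (out : List Int) : Prop := out = count_alt N
instance (N : Int) (out : List Int) : Decidable (Spec_count N out) := by unfold Spec_count; infer_instance

-- ===== CLAIM (what is proved, stated in full; the proofs are below) =====
def Claim_equal_count : Prop := ∀ (N : Int), Dom_count N → Spec_count N (count N)

-- ===== LEMMAS AND PROOFS =====

-- ports of B's position list (implicit in both loops) and of A's per-position formula
def posGo (N r : Int) : List Int :=
  if h : 0 < r ∧ r < N then r :: posGo N (2 * r) else []
termination_by (N - r).toNat
decreasing_by omega

def Fa (N s : Int) : Int :=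
  PySem.Int.floordiv N (2 * s) * s + max (PySem.Int.mod N (2 * s) - s) 0

-- A's loop yields exactly A's formula at each position
theorem countGo_eq_map (N r : Int) : countGo N r = (posGo N r).map (Fa N) := by
  rw [countGo, posGo]
  split
  · rw [List.map_cons, countGo_eq_map N (2 * r)]; rfl
  · rfl
termination_by (N - r).toNat
decreasing_by omega

-- bit s of m, extracted arithmetically
theorem bit_eq (m s : Int) (hs : 0 < s) :
    m / s % 2 = if m % (2 * s) < s then (0 : Int) else 1 := by
  have h2s : 0 < 2 * s := by omega
  set q := m / (2 * s) with hq
  set u := m % (2 * s) with hu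
  have hu0 : 0 ≤ u := Int.emod_nonneg m (by omega)
  have hu1 : u < 2 * s := Int.emod_lt_of_pos m h2s
  have hm_eq : m = 2 * s * q + u := (Int.mul_ediv_add_emod m (2 * s)).symm
  have husr : u / s = if u < s then (0 : Int) else 1 := by
    split
    · exact Int.ediv_eq_zero_of_lt hu0 ‹u < s›
    · rw [show u = (u - s) + 1 * s by ring, Int.add_mul_ediv_right _ _ hs.ne',
        Int.ediv_eq_zero_of_lt (by omega) (by omega)]
      omega
  have hms : m / s = u / s + 2 * q := by
    rw [hm_eq, show 2 * s * q + u = u + (2 * q) * s by ring,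
      Int.add_mul_ediv_right _ _ hs.ne']
  rw [hms, husr]
  split <;> omega

-- the arithmetic heart: lifting the closed form one bit position up
theorem step2 (m s b : Int) (hs : 0 < s) (hb0 : 0 ≤ b) (hb1 : b < 2) :
    Fa (2 * m + b) (2 * s) = 2 * Fa m s + b * PySem.Int.mod (PySem.Int.floordiv m s) 2 := by
  unfold Fa
  rw [PySem.Int.floordiv_eq_ediv_of_pos (by omega : (0:Int) < 2 * (2 * s)),
    PySem.Int.mod_eq_emod_of_pos (by omega : (0:Int) < 2 * (2 * s)),
    PySem.Int.floordiv_eq_ediv_of_pos (by omega : (0:Int) < 2 * s),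
    PySem.Int.mod_eq_emod_of_pos (by omega : (0:Int) < 2 * s),
    PySem.Int.floordiv_eq_ediv_of_pos hs,
    PySem.Int.mod_eq_emod_of_pos (by omega : (0:Int) < 2),
    bit_eq m s hs]
  have h2s : 0 < 2 * s := by omega
  set q := m / (2 * s) with hq
  set u := m % (2 * s) with hu
  have hu0 : 0 ≤ u := Int.emod_nonneg m (by omega)
  have hu1 : u < 2 * s := Int.emod_lt_of_pos m h2s
  have hm_eq : m = 2 * s * q + u := (Int.mul_ediv_add_emod m (2 * s)).symm
  have hd : (2 * m + b) / (2 * (2 * s)) = q := by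
    rw [show 2 * m + b = (2 * u + b) + q * (2 * (2 * s)) by rw [hm_eq]; ring,
      Int.add_mul_ediv_right _ _ (by omega : (2 * (2 * s) : Int) ≠ 0),
      Int.ediv_eq_zero_of_lt (by omega) (by omega)]
    ring
  have he : (2 * m + b) % (2 * (2 * s)) = 2 * u + b := by
    rw [show 2 * m + b = (2 * u + b) + (2 * (2 * s)) * q by rw [hm_eq]; ring,
      Int.add_mul_emod_self_left, Int.emod_eq_of_lt (by omega) (by omega)]
  rw [hd, he, show q * (2 * s) = 2 * (q * s) by ring]
  generalize q * s = t
  split <;> simp [max_def] <;> split <;> split <;> omega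

-- the closed form vanishes beyond the last position
theorem Fa_zero (m s : Int) (hm : 0 ≤ m) (hms : m ≤ s) (hs : 0 < s) : Fa m s = 0 := by
  unfold Fa
  rw [PySem.Int.floordiv_eq_ediv_of_pos (by omega : (0:Int) < 2 * s),
    PySem.Int.mod_eq_emod_of_pos (by omega : (0:Int) < 2 * s),
    Int.ediv_eq_zero_of_lt hm (by omega), Int.emod_eq_of_lt hm (by omega)]
  omega

-- B's while loop, fed the counts for [0, m), produces A's formula at the doubled positions
theorem loopGo_map (N m b : Int) (hN : N = 2 * m + b) (hb0 : 0 ≤ b) (hb1 : b < 2)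
    (s : Int) (hs : 0 < s) :
    loopGo N m b ((posGo m s).map (Fa m)) s = (posGo N (2 * s)).map (Fa N) := by
  rw [loopGo]
  by_cases hg : 2 * s < N
  · rw [dif_pos ⟨hs, hg⟩]
    have hm : 0 ≤ m := by omega
    have hrec := loopGo_map N m b hN hb0 hb1 (2 * s) (by omega)
    have hR : posGo N (2 * s) = 2 * s :: posGo N (2 * (2 * s)) := by
      rw [posGo, dif_pos ⟨by omega, hg⟩]
    have hstep : Fa N (2 * s) = 2 * Fa m s + b * PySem.Int.mod (PySem.Int.floordiv m s) 2 := by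
      rw [hN]; exact step2 m s b hs hb0 hb1
    by_cases hsm : s < m
    · have hL : posGo m s = s :: posGo m (2 * s) := by
        rw [posGo, dif_pos ⟨hs, hsm⟩]
      rw [hL, List.map_cons, List.headD_cons, List.tail_cons, hrec, hR, List.map_cons, hstep]
    · have hpe : posGo m s = [] := by rw [posGo, dif_neg (by omega)]
      have hpe2 : posGo m (2 * s) = [] := by rw [posGo, dif_neg (by omega)]
      rw [hpe, List.map_nil]
      rw [hpe2, List.map_nil] at hrec
      rw [show ([] : List Int).headD 0 = 0 from rfl, show ([] : List Int).tail = [] from rfl,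
        hrec, hR, List.map_cons, hstep, Fa_zero m s hm (by omega) hs]
  · rw [dif_neg (by omega), posGo, dif_neg (by omega), List.map_nil]
termination_by (N - s).toNat
decreasing_by omega

-- B computes A's formula at every position
theorem count_alt_eq (N : Int) : count_alt N = (posGo N 1).map (Fa N) := by
  rw [count_alt]
  by_cases h : N ≤ 1
  · rw [dif_pos h, posGo, dif_neg (by omega), List.map_nil]
  · rw [dif_neg h]
    have hfd : PySem.Int.floordiv N 2 = N / 2 :=
      PySem.Int.floordiv_eq_ediv_of_pos (by omega : (0:Int) < 2)
    have hmd : PySem.Int.mod N 2 = N % 2 :=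
      PySem.Int.mod_eq_emod_of_pos (by omega : (0:Int) < 2)
    have hN : N = 2 * (PySem.Int.floordiv N 2) + PySem.Int.mod N 2 := by
      rw [hfd, hmd]; omega
    have hb0 : 0 ≤ PySem.Int.mod N 2 := by rw [hmd]; omega
    have hb1 : PySem.Int.mod N 2 < 2 := by rw [hmd]; omega
    have hih := count_alt_eq (PySem.Int.floordiv N 2)
    have hR : posGo N 1 = 1 :: posGo N (2 * 1) := by
      rw [posGo, dif_pos ⟨by omega, by omega⟩]
    rw [hih, loopGo_map N (PySem.Int.floordiv N 2) (PySem.Int.mod N 2) hN hb0 hb1 1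
      (by omega), hR, List.map_cons]
    congr 1
    unfold Fa
    rw [show (2 : Int) * 1 = 2 by norm_num, hfd, hmd]
    have h1 : 0 ≤ N % 2 := by omega
    have h2 : N % 2 < 2 := by omega
    omega
termination_by N.toNat
decreasing_by
  rw [PySem.Int.floordiv_eq_ediv_of_pos (by omega : (0:Int) < 2)]
  omega

-- ===== VERDICT (by name: the statement is the Claim_ definition above) =====
theorem count_spec : Claim_equal_count := by
  intro N _
  show count N = count_alt N
  rw [count, countGo_eq_map, count_alt_eq]
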